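-- pv_equiv track=rewrite | github.com/romanpauk/time-trace | tests/support/perf_checks.py | _call_graph_blocks
-- ===== SOURCE A (Python) =====
-- def _call_graph_blocks(text: str) -> list[list[str]]:
--     blocks: list[list[str]] = []
--     current: list[str] = []
--     for raw_line in text.splitlines():
--         stripped = raw_line.strip()
--         if not stripped:
--             if current:
--                 blocks.append(current)
--                 current = []
--             continue
--         if stripped.startswith("#"):
--             continue
--         if stripped in {"|", "---", "--"}:
--             continue
--         current.append(stripped)
--     if current:
--         blocks.append(current)
--     return blocks
-- ===== SOURCE B (Python) =====
-- def _call_graph_blocks(text: str) -> list[list[str]]: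
--     # phase 1: split the stripped lines into runs, blank lines being the only delimiter
--     runs: list[list[str]] = [[]]
--     for line in text.splitlines():
--         s = line.strip()
--         if s:
--             runs[-1].append(s)
--         else:
--             runs.append([])
--     # phase 2: drop comments/separators from each run, keep the non-empty results
--     return [blk for blk in
--             ([l for l in run if not l.startswith("#") and l not in ("|", "---", "--")]
--              for run in runs)
--             if blk]
-- ===== Notes on version B (the rewrite author's own statement) =====
-- stated objective: alternative
-- what changed: A's single stateful loop that filters lines while accumulating and flushes a current buffer on blanks is replaced by a two-phase pass: first split the stripped lines into runs delimited by blank lines, then filter comments/separators out of each run and keep the non-empty results.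
import Mathlib
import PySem

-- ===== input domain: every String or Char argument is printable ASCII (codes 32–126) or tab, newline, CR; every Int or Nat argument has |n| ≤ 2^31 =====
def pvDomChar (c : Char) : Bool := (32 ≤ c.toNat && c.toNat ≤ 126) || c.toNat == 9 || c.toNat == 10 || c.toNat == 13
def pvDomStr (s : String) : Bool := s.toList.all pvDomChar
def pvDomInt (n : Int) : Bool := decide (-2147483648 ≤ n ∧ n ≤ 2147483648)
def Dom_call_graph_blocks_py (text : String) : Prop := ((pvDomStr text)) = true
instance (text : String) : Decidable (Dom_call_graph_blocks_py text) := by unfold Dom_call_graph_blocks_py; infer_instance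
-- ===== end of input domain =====

-- B groups stripped lines into blank-delimited runs first and filters afterwards; A filters while
-- accumulating a current buffer and flushes it on blank lines. Same return value; alternative decomposition.

-- ===== PORT A =====
-- A's loop body: state = (blocks, current)
def pvStepA (st : List (List String) × List String) (raw_line : String) :
    List (List String) × List String :=
  let stripped := PySem.Str.strip raw_line
  if stripped = "" then
    (if st.2 ≠ [] then (st.1 ++ [st.2], ([] : List String)) else st)
  else if PySem.Str.startswith stripped "#" then st
  else if stripped = "|" ∨ stripped = "---" ∨ stripped = "--" then st
  else (st.1, st.2 ++ [stripped])

def call_graph_blocks_py (text : String) : List (List String) :=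
  let st := (PySem.Str.splitlines text).foldl pvStepA ([], [])
  if st.2 ≠ [] then st.1 ++ [st.2] else st.1

-- ===== PORT B =====
-- B phase 1 loop body: runs[-1].append(s) on non-blank, runs.append([]) on blank
def pvStepB (rs : List (List String)) (line : String) : List (List String) :=
  let s := PySem.Str.strip line
  if s = "" then rs ++ [([] : List String)] else rs.dropLast ++ [rs.getLast! ++ [s]]

-- B's comprehension filter: not a comment, not a separator
def pvKeep (l : String) : Bool :=
  !(PySem.Str.startswith l "#") && !(l == "|") && !(l == "---") && !(l == "--")

def call_graph_blocks_py_alt (text : String) : List (List String) :=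
  let runs := (PySem.Str.splitlines text).foldl pvStepB [[]]
  (runs.map (fun run => run.filter pvKeep)).filter (fun b => !b.isEmpty)

-- ===== PRECONDITION & SPEC =====
def Spec_call_graph_blocks_py (text : String) (out : List (List String)) : Prop := out = call_graph_blocks_py_alt text
instance (text : String) (out : List (List String)) : Decidable (Spec_call_graph_blocks_py text out) := by unfold Spec_call_graph_blocks_py; infer_instance

-- ===== CLAIM (what is proved, stated in full; the proofs are below) =====
def Claim_equal_call_graph_blocks_py : Prop := ∀ (text : String), Dom_call_graph_blocks_py text → Spec_call_graph_blocks_py text (call_graph_blocks_py text)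

-- ===== LEMMAS AND PROOFS =====

-- B's phase 2 applied to a run list
def pvClean (rs : List (List String)) : List (List String) :=
  (rs.map (fun run => run.filter pvKeep)).filter (fun b => !b.isEmpty)

-- A's post-loop flush
def pvFinishA (st : List (List String) × List String) : List (List String) :=
  if st.2 ≠ [] then st.1 ++ [st.2] else st.1

lemma pvClean_concat (rs : List (List String)) (cur : List String) :
    pvClean (rs ++ [cur]) =
      pvClean rs ++ (if (cur.filter pvKeep) ≠ [] then [cur.filter pvKeep] else []) := by
  simp only [pvClean, List.map_append, List.map_cons, List.map_nil, List.filter_append]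
  congr 1
  rcases h : cur.filter pvKeep with _ | ⟨a, t⟩ <;> simp [h]

lemma pvFilter_keep (cur : List String) (s : String) (h : pvKeep s = true) :
    (cur ++ [s]).filter pvKeep = cur.filter pvKeep ++ [s] := by
  simp [List.filter_append, h]

lemma pvFilter_drop (cur : List String) (s : String) (h : pvKeep s = false) :
    (cur ++ [s]).filter pvKeep = cur.filter pvKeep := by
  simp [List.filter_append, h]

lemma pvKey : ∀ (lines : List String) (done : List (List String)) (cur : List String),
    pvFinishA (lines.foldl pvStepA (pvClean done, cur.filter pvKeep))
      = pvClean (lines.foldl pvStepB (done ++ [cur])) := by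
  intro lines
  induction lines with
  | nil =>
      intro done cur
      simp only [List.foldl_nil, pvFinishA, pvClean_concat]
      split <;> simp_all
  | cons line rest ih =>
      intro done cur
      simp only [List.foldl_cons]
      by_cases hblank : PySem.Str.strip line = ""
      · have hA : pvStepA (pvClean done, cur.filter pvKeep) line
            = (pvClean (done ++ [cur]), ([] : List String).filter pvKeep) := by
          simp only [pvStepA]
          rw [if_pos hblank, pvClean_concat]
          split <;> simp_all
        have hB : pvStepB (done ++ [cur]) line = (done ++ [cur]) ++ [[]] := by
          simp only [pvStepB]; rw [if_pos hblank]
        rw [hA, hB, ih]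
      · have hB : pvStepB (done ++ [cur]) line
            = done ++ [cur ++ [PySem.Str.strip line]] := by
          simp only [pvStepB]
          rw [if_neg hblank]
          simp
        by_cases hh : PySem.Str.startswith (PySem.Str.strip line) "#" = true
        · have hh' : PySem.Chars.startswith (PySem.Chars.strip line.toList) ['#'] = true := by
            simpa using hh
          have hk : pvKeep (PySem.Str.strip line) = false := by
            simp [pvKeep, hh']
          have hA : pvStepA (pvClean done, cur.filter pvKeep) line
              = (pvClean done, cur.filter pvKeep) := by
            simp only [pvStepA]
            rw [if_neg hblank, if_pos hh]
          rw [hA, hB]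
          have h2 := ih done (cur ++ [PySem.Str.strip line])
          rwa [pvFilter_drop _ _ hk] at h2
        · by_cases hsep : PySem.Str.strip line = "|" ∨ PySem.Str.strip line = "---" ∨
              PySem.Str.strip line = "--"
          · have hk : pvKeep (PySem.Str.strip line) = false := by
              rcases hsep with h | h | h <;> simp [pvKeep, h]
            have hA : pvStepA (pvClean done, cur.filter pvKeep) line
                = (pvClean done, cur.filter pvKeep) := by
              simp only [pvStepA]
              rw [if_neg hblank, if_neg hh, if_pos hsep]
            rw [hA, hB]
            have h2 := ih done (cur ++ [PySem.Str.strip line])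
            rwa [pvFilter_drop _ _ hk] at h2
          · have hk : pvKeep (PySem.Str.strip line) = true := by
              push Not at hsep
              have hh' : PySem.Chars.startswith (PySem.Chars.strip line.toList) ['#'] = false := by
                have h0 : PySem.Str.startswith (PySem.Str.strip line) "#" = false :=
                  Bool.eq_false_iff.mpr hh
                simpa using h0
              simp [pvKeep, hh', hsep.1, hsep.2.1, hsep.2.2]
            have hA : pvStepA (pvClean done, cur.filter pvKeep) line
                = (pvClean done, cur.filter pvKeep ++ [PySem.Str.strip line]) := by
              simp only [pvStepA]
              rw [if_neg hblank, if_neg hh, if_neg hsep]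
            rw [hA, hB]
            have h2 := ih done (cur ++ [PySem.Str.strip line])
            rwa [pvFilter_keep _ _ hk] at h2

-- ===== VERDICT (by name: the statement is the Claim_ definition above) =====
theorem call_graph_blocks_py_spec : Claim_equal_call_graph_blocks_py := by
  intro text _
  show call_graph_blocks_py text = call_graph_blocks_py_alt text
  have := pvKey (PySem.Str.splitlines text) [] []
  simpa [call_graph_blocks_py, call_graph_blocks_py_alt, pvFinishA, pvClean] using this
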